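-- pv_equiv track=rewrite | github.com/nicorinn/u-of-courses-parsing | eval_parser/process_comments.py | refine_keywords
-- ===== SOURCE A (Python) =====
-- from operator import itemgetter
--
-- num_keywords = 25
--
-- def refine_keywords(keywords, instructor_names, unwanted_keywords):
--     refined_keywords = []
--     for word in keywords:
--         if word[0].lower() not in instructor_names and word[0].lower() not in unwanted_keywords:
--             refined_keywords.append(word)
--     refined_keywords.sort(key=itemgetter(1))
--     length = num_keywords if len(
--         refined_keywords) >= num_keywords else len(refined_keywords)
--
--     return refined_keywords[:length]
-- ===== SOURCE B (Python) =====
-- num_keywords = 25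
--
-- def _insort(top, word):
--     if not top or word[1] < top[0][1]:
--         return [word] + top
--     return [top[0]] + _insort(top[1:], word)
--
-- def refine_keywords(keywords, instructor_names, unwanted_keywords):
--     top = []
--     for word in keywords:
--         w = word[0].lower()
--         if w not in instructor_names and w not in unwanted_keywords:
--             if len(top) < num_keywords or word[1] < top[-1][1]:
--                 top = _insort(top, word)[:num_keywords]
--     return top
-- ===== Notes on version B (the rewrite author's own statement) =====
-- stated objective: alternative
-- what changed: B replaces A's full stable sort of the filtered list followed by a length-computed slice with a single pass that maintains a bounded (at most 25 elements) count-sorted list via stable insertion and truncation, i.e. a partial top-k selection instead of sort-then-slice.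
import Mathlib
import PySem

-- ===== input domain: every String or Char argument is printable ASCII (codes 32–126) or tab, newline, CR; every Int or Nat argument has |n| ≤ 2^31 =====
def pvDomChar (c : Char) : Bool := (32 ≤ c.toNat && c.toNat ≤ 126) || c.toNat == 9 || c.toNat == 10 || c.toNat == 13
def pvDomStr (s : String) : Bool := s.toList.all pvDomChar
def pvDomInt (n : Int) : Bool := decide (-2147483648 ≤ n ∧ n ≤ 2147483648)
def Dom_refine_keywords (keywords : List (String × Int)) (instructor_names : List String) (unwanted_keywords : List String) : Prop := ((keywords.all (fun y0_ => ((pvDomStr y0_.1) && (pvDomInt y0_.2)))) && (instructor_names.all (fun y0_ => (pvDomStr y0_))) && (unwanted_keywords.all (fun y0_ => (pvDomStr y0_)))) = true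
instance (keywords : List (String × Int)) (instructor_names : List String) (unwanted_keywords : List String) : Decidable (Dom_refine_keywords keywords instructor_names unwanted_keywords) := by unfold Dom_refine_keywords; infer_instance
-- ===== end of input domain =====

-- B replaces A's full stable sort plus slice by a single pass that maintains a bounded (≤ 25)
-- count-sorted list via stable insertion and truncation (partial selection); same return value.

-- ===== PORT A =====
def refine_keywords (keywords : List (String × Int)) (instructor_names : List String) (unwanted_keywords : List String) : List (String × Int) :=
  -- refined_keywords = []; for word in keywords: if …: refined_keywords.append(word)
  let refined_keywords : List (String × Int) := keywords.foldl
    (fun acc word =>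
      if (PySem.Str.lower word.1) ∉ instructor_names ∧ (PySem.Str.lower word.1) ∉ unwanted_keywords
      then acc ++ [word] else acc) []
  -- refined_keywords.sort(key=itemgetter(1))
  let sortedKw := PySem.List.sorted refined_keywords (fun w => w.2)
  -- length = num_keywords if len(refined_keywords) >= num_keywords else len(refined_keywords)
  let length : Int := if (sortedKw.length : Int) ≥ 25 then 25 else (sortedKw.length : Int)
  -- return refined_keywords[:length]
  PySem.List.slice sortedKw none (some length)

-- ===== PORT B =====
-- _insort(top, word): stable insertion by count (recursive, as in Source B)
def rkInsort (top : List (String × Int)) (word : String × Int) : List (String × Int) :=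
  match top with
  | [] => [word]
  | y :: ys => if word.2 < y.2 then word :: y :: ys else y :: rkInsort ys word

-- len(top) < num_keywords or word[1] < top[-1][1]
def rkGuard (top : List (String × Int)) (word : String × Int) : Bool :=
  top.length < 25 ||
    (match PySem.List.pyGet? top (-1) with
     | some y => decide (word.2 < y.2)
     | none => false)

def refine_keywords_alt (keywords : List (String × Int)) (instructor_names : List String) (unwanted_keywords : List String) : List (String × Int) :=
  keywords.foldl
    (fun top word =>
      let w := PySem.Str.lower word.1
      if w ∉ instructor_names ∧ w ∉ unwanted_keywords
      then (if rkGuard top word then (rkInsort top word).take 25 else top) else top) []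

-- ===== PRECONDITION & SPEC =====
def Spec_refine_keywords (keywords : List (String × Int)) (instructor_names : List String) (unwanted_keywords : List String) (out : List (String × Int)) : Prop := out = refine_keywords_alt keywords instructor_names unwanted_keywords
instance (keywords : List (String × Int)) (instructor_names : List String) (unwanted_keywords : List String) (out : List (String × Int)) : Decidable (Spec_refine_keywords keywords instructor_names unwanted_keywords out) := by unfold Spec_refine_keywords; infer_instance

-- ===== CLAIM (what is proved, stated in full; the proofs are below) =====
def Claim_equal_refine_keywords : Prop := ∀ (keywords : List (String × Int)) (instructor_names : List String) (unwanted_keywords : List String), Dom_refine_keywords keywords instructor_names unwanted_keywords → Spec_refine_keywords keywords instructor_names unwanted_keywords (refine_keywords keywords instructor_names unwanted_keywords)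

-- ===== LEMMAS AND PROOFS =====

-- B's hand-written stable insertion is PySem's insertBy with the strict count comparison.
theorem rkInsort_eq_insertBy (top : List (String × Int)) (word : String × Int) :
    rkInsort top word = PySem.List.insertBy (fun a b => decide (a.2 < b.2)) word top := by
  induction top with
  | nil => simp [rkInsort, PySem.List.insertBy]
  | cons y ys ih => simp [rkInsort, PySem.List.insertBy, ih]

-- taking k commutes with insertion into a list truncated to k
theorem take_insertBy {α : Type} (bef : α → α → Bool) (x : α) (a : List α) (k : Nat) :
    (PySem.List.insertBy bef x a).take k = ((PySem.List.insertBy bef x (a.take k)).take k) := by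
  induction a generalizing k with
  | nil => simp
  | cons y ys ih =>
    by_cases h : bef x y = true
    · cases k with
      | zero => simp
      | succ k' =>
        cases k' with
        | zero => simp [PySem.List.insertBy, h]
        | succ j => simp [PySem.List.insertBy, h, List.take_take]
    · cases k with
      | zero => simp
      | succ k' =>
        simp [PySem.List.insertBy, h]
        exact ih k'

-- sorting with one more element at the end is one more stable insertion
theorem sorted_snoc (l : List (String × Int)) (x : String × Int) :
    PySem.List.sorted (l ++ [x]) (fun w => w.2)
      = PySem.List.insertBy (fun a b => decide (a.2 < b.2)) x
          (PySem.List.sorted l (fun w => w.2)) := by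
  rw [PySem.List.sorted_eq_foldl_insertBy, PySem.List.sorted_eq_foldl_insertBy,
    List.foldl_append]
  simp

-- when B's guard is false, the new word would be inserted past position 25 and truncated away
theorem step_false (l : List (String × Int)) (x : String × Int)
    (hg : rkGuard ((PySem.List.sorted l (fun w => w.2)).take 25) x = false) :
    (PySem.List.sorted (l ++ [x]) (fun w => w.2)).take 25
      = (PySem.List.sorted l (fun w => w.2)).take 25 := by
  set s := PySem.List.sorted l (fun w => w.2) with hs
  set t := s.take 25 with ht
  simp only [rkGuard, Bool.or_eq_false_iff, decide_eq_false_iff_not, not_lt] at hg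
  obtain ⟨hlen, hmatch⟩ := hg
  have hlen25 : t.length = 25 := le_antisymm (by simp [ht]) hlen
  have hne : t ≠ [] := by intro h; rw [h] at hlen25; simp at hlen25
  have hlast : PySem.List.pyGet? t (-1) = some (t.getLast hne) := by
    rw [PySem.List.pyGet?_neg_one, List.getLast?_eq_some_getLast]
  rw [hlast] at hmatch
  simp only [decide_eq_false_iff_not, not_lt] at hmatch
  have hpt : t.Pairwise (fun a b => a.2 ≤ b.2) := by
    exact List.Pairwise.sublist (List.take_sublist 25 s)
      (PySem.List.sorted_pairwise l (fun w => w.2))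
  have hall : ∀ z ∈ t, (x.2 < z.2) = False := by
    intro z hz
    simp only [eq_iff_iff, iff_false, not_lt]
    have hz2 : z.2 ≤ (t.getLast hne).2 := by
      have hdecomp := List.dropLast_append_getLast hne
      rw [← hdecomp] at hpt hz
      rcases List.mem_append.mp hz with hzd | hzl
      · exact (List.pairwise_append.mp hpt).2.2 z hzd _ (List.mem_singleton_self _)
      · rw [List.mem_singleton.mp hzl]
    exact le_trans hz2 hmatch
  rw [sorted_snoc, take_insertBy, ← ht,
    PySem.List.insertBy_of_forall_not_before _ _ _ (fun y hy => by simp [hall y hy]),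
    List.take_left' hlen25]

-- the guarded bounded-insertion fold computes the truncation of the insertion-sort fold
theorem foldl_guarded (xs l : List (String × Int)) :
    xs.foldl
      (fun top word => if rkGuard top word
        then (PySem.List.insertBy (fun a b => decide (a.2 < b.2)) word top).take 25 else top)
      ((PySem.List.sorted l (fun w => w.2)).take 25)
      = (xs.foldl (fun acc x => PySem.List.insertBy (fun a b => decide (a.2 < b.2)) x acc)
          (PySem.List.sorted l (fun w => w.2))).take 25 := by
  induction xs generalizing l with
  | nil => rfl
  | cons x xs ih =>
    simp only [List.foldl_cons]
    by_cases hg : rkGuard ((PySem.List.sorted l (fun w => w.2)).take 25) x = true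
    · rw [if_pos hg, ← take_insertBy, ← sorted_snoc l x]
      exact ih (l ++ [x])
    · rw [if_neg hg]
      have h1 := (step_false l x (Bool.eq_false_iff.mpr hg)).symm
      rw [h1, ← sorted_snoc l x]
      exact ih (l ++ [x])

-- ===== VERDICT (by name: the statement is the Claim_ definition above) =====
theorem refine_keywords_spec : Claim_equal_refine_keywords := by
  unfold Claim_equal_refine_keywords
  intro kw ns uw _
  unfold Spec_refine_keywords refine_keywords refine_keywords_alt
  set p : (String × Int) → Bool :=
    fun word => decide ((PySem.Str.lower word.1) ∉ ns ∧ (PySem.Str.lower word.1) ∉ uw) with hp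
  have hA : kw.foldl (fun acc word =>
      if (PySem.Str.lower word.1) ∉ ns ∧ (PySem.Str.lower word.1) ∉ uw
      then acc ++ [word] else acc) [] = kw.filter p := by
    have hAfun : (fun (acc : List (String × Int)) word =>
        if (PySem.Str.lower word.1) ∉ ns ∧ (PySem.Str.lower word.1) ∉ uw
        then acc ++ [word] else acc)
        = fun acc word => if p word = true then acc ++ [word] else acc := by
      funext a w; simp [hp]
    rw [hAfun]
    simpa using PySem.List.foldl_append_if p (fun x => x) kw []
  have hBfun : (fun (top : List (String × Int)) word =>
      let w := PySem.Str.lower word.1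
      if w ∉ ns ∧ w ∉ uw
      then (if rkGuard top word then (rkInsort top word).take 25 else top) else top)
      = fun top word => if p word = true
          then (if rkGuard top word
            then (PySem.List.insertBy (fun a b => decide (a.2 < b.2)) word top).take 25
            else top)
          else top := by
    funext t w; simp [hp, rkInsort_eq_insertBy]
  rw [hBfun, ← List.foldl_filter]
  have hB : (kw.filter p).foldl
      (fun top word => if rkGuard top word
        then (PySem.List.insertBy (fun a b => decide (a.2 < b.2)) word top).take 25 else top) []
      = (PySem.List.sorted (kw.filter p) (fun w => w.2)).take 25 := by
    have h0 : ([] : List (String × Int))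
        = (PySem.List.sorted ([] : List (String × Int)) (fun w => w.2)).take 25 := rfl
    rw [h0, foldl_guarded]
    rw [PySem.List.sorted_eq_foldl_insertBy (kw.filter p) (fun w => w.2)]
    rfl
  rw [hB, hA]
  show PySem.List.slice (PySem.List.sorted (kw.filter p) (fun w => w.2)) none
      (some (if ((PySem.List.sorted (kw.filter p) (fun w => w.2)).length : Int) ≥ 25 then 25
             else ((PySem.List.sorted (kw.filter p) (fun w => w.2)).length : Int)))
    = List.take 25 (PySem.List.sorted (kw.filter p) (fun w => w.2))
  set s := PySem.List.sorted (kw.filter p) (fun w => w.2) with hs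
  by_cases hlen : (s.length : Int) ≥ 25
  · rw [if_pos hlen, PySem.List.slice_to _ (by norm_num)]
    rfl
  · rw [if_neg hlen, PySem.List.slice_to _ (by positivity)]
    rw [Int.toNat_natCast, List.take_length,
      List.take_of_length_le (by omega : s.length ≤ 25)]
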